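-- pv_equiv track=rewrite | github.com/ReSuKiii/quote-guess-lol | quote lol/get_quotes.py | is_invalid_quote
-- ===== SOURCE A (Python) =====
-- def is_invalid_quote(quote):
--     # Fonction pour déterminer si une citation est invalide
--     invalid_phrases = [
--         "Sound Effect",
--         "15 seconds cooldown",
--         "Cooldown",
--         "Sound Effects",
--         "plays",
--         "synthwave",
--         "remix",
--         "to protect our land",
--         "to save it",
--         "waiting",
--         "for Demacia",
--         "together",
--     ]
--
--     # Vérifier si la citation contient une phrase invalide
--     return any(invalid_phrase.lower() in quote.lower() for invalid_phrase in invalid_phrases)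
-- ===== SOURCE B (Python) =====
-- _PHRASES = (
--     "sound effect",
--     "15 seconds cooldown",
--     "cooldown",
--     "sound effects",
--     "plays",
--     "synthwave",
--     "remix",
--     "to protect our land",
--     "to save it",
--     "waiting",
--     "for demacia",
--     "together",
-- )
--
-- def is_invalid_quote(quote):
--     # One pass over the lowered text: at each position, test whether any
--     # (pre-lowered) invalid phrase starts there.
--     q = quote.lower()
--     for i in range(len(q)):
--         for p in _PHRASES:
--             if q.startswith(p, i):
--                 return True
--     return False
-- ===== Notes on version B (the rewrite author's own statement) =====
-- stated objective: alternative
-- what changed: Replaced N independent substring scans (one 'in' test per phrase over the whole lowered text) with a single left-to-right pass over the lowered text that checks at each position whether any pre-lowered phrase starts there, short-circuiting on the first hit.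
import Mathlib
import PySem

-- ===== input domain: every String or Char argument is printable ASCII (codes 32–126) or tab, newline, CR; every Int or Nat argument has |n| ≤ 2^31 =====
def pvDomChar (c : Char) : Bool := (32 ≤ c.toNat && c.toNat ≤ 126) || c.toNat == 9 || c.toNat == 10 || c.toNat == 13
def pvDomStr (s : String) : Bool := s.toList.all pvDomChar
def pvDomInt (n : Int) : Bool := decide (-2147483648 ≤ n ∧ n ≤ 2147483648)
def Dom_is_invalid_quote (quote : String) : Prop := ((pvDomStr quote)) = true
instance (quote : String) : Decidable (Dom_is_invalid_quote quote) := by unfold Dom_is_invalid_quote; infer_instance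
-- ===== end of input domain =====

-- B replaces A's twelve independent substring scans by a single left-to-right pass over
-- the lowered text, checking at each position whether any pre-lowered phrase starts there.


-- ===== PORT A =====
def invalidPhrasesA : List String :=
  ["Sound Effect", "15 seconds cooldown", "Cooldown", "Sound Effects", "plays",
   "synthwave", "remix", "to protect our land", "to save it", "waiting",
   "for Demacia", "together"]

def is_invalid_quote (quote : String) : Bool :=
  invalidPhrasesA.any (fun p => PySem.Str.isIn (PySem.Str.lower p) (PySem.Str.lower quote))

-- ===== PORT B =====
def phrasesB : List String :=
  ["sound effect", "15 seconds cooldown", "cooldown", "sound effects", "plays",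
   "synthwave", "remix", "to protect our land", "to save it", "waiting",
   "for demacia", "together"]

-- the position loop 'for i in range(len(q))' as structural recursion over the suffixes of q
def scanB : List Char → Bool
  | [] => false
  | c :: t => phrasesB.any (fun p => p.toList.isPrefixOf (c :: t)) || scanB t

def is_invalid_quote_alt (quote : String) : Bool :=
  scanB (PySem.Str.lower quote).toList

-- ===== PRECONDITION & SPEC =====
def Spec_is_invalid_quote (quote : String) (out : Bool) : Prop := out = is_invalid_quote_alt quote
instance (quote : String) (out : Bool) : Decidable (Spec_is_invalid_quote quote out) := by unfold Spec_is_invalid_quote; infer_instance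

-- ===== CLAIM (what is proved, stated in full; the proofs are below) =====
def Claim_equal_is_invalid_quote : Prop := ∀ (quote : String), Dom_is_invalid_quote quote → Spec_is_invalid_quote quote (is_invalid_quote quote)

-- ===== LEMMAS AND PROOFS =====

-- every phrase in B's list is nonempty (so no phrase is an infix of the empty text)
theorem phrasesB_ne_nil : ∀ p ∈ phrasesB, p.toList ≠ [] := by decide

-- B's suffix scan finds exactly the phrases that occur as an infix of the text
theorem scanB_eq_any_infix (s : List Char) :
    scanB s = phrasesB.any (fun p => decide (p.toList <:+: s)) := by
  induction s with
  | nil =>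
    simp only [scanB]
    symm
    simp only [List.any_eq_false, decide_eq_true_eq]
    intro p hp h
    exact phrasesB_ne_nil p hp (List.eq_nil_of_infix_nil h)
  | cons c t ih =>
    simp only [scanB, ih]
    rcases h : phrasesB.any (fun p => p.toList.isPrefixOf (c :: t)) with _ | _
    · simp only [Bool.false_or]
      rcases h2 : phrasesB.any (fun p => decide (p.toList <:+: t)) with _ | _
      · symm
        simp only [List.any_eq_false, decide_eq_true_eq]
        intro p hp hinf
        rcases (List.infix_cons_iff.mp hinf) with hpre | hinf'
        · have := List.any_eq_false.mp h p hp
          simp [List.isPrefixOf_iff_prefix] at this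
          exact this hpre
        · have := List.any_eq_false.mp h2 p hp
          simp at this
          exact this hinf'
      · symm
        simp only [List.any_eq_true, decide_eq_true_eq]
        obtain ⟨p, hp, hinf⟩ := List.any_eq_true.mp h2
        exact ⟨p, hp, (List.infix_cons_iff.mpr (Or.inr (by simpa using hinf)))⟩
    · simp only [Bool.true_or]
      symm
      simp only [List.any_eq_true, decide_eq_true_eq]
      obtain ⟨p, hp, hpre⟩ := List.any_eq_true.mp h
      exact ⟨p, hp, (List.infix_cons_iff.mpr (Or.inl (List.isPrefixOf_iff_prefix.mp hpre)))⟩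

-- lowering A's phrase list gives B's list
theorem map_lower_phrasesA : invalidPhrasesA.map PySem.Str.lower = phrasesB := by decide

-- ===== VERDICT (by name: the statement is the Claim_ definition above) =====
theorem is_invalid_quote_spec : Claim_equal_is_invalid_quote := by
  intro quote _
  unfold Spec_is_invalid_quote is_invalid_quote is_invalid_quote_alt
  rw [scanB_eq_any_infix, ← map_lower_phrasesA, List.any_map]
  apply List.any_congr
  case w => rfl
  intro p
  simp only [Function.comp]
  rcases h : PySem.Str.isIn (PySem.Str.lower p) (PySem.Str.lower quote) with _ | _
  · symm
    simp only [decide_eq_false_iff_not]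
    intro hinf
    rw [← Bool.not_eq_true] at h
    exact h ((PySem.Str.isIn_iff_infix _ _).mpr hinf)
  · symm
    simpa using (PySem.Str.isIn_iff_infix _ _).mp h
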